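-- pv_equiv track=rewrite | github.com/PolinaVasilevich/Training | SecondTask.py | string_conversion
-- ===== SOURCE A (Python) =====
-- def string_conversion(s):
--     letter = set('abcdefghijklmnopqrstuvwxyzABCDEFGHIJKLMNOPQRSTUVWXYZ')
--     s = s.split()
--     res = []
--     for word in s:
--         a = ''
--         for l in word:
--             if l in letter:
--                 a += l
--         res.append(a)
--     return ' '.join(res)
-- ===== SOURCE B (Python) =====
-- def string_conversion(s):
--     letters = set('abcdefghijklmnopqrstuvwxyzABCDEFGHIJKLMNOPQRSTUVWXYZ')
--     res = []
--     buf = []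
--     in_word = False
--     for c in s:
--         if c.isspace():
--             if in_word:
--                 res.append(''.join(buf))
--                 buf = []
--                 in_word = False
--         else:
--             in_word = True
--             if c in letters:
--                 buf.append(c)
--     if in_word:
--         res.append(''.join(buf))
--     return ' '.join(res)
-- ===== Notes on version B (the rewrite author's own statement) =====
-- stated objective: alternative
-- what changed: Replaces split()-then-nested-loop with a single left-to-right character scan maintaining an in_word flag and a letter buffer, flushing one entry per non-whitespace run; no intermediate word list is built.
import Mathlib
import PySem

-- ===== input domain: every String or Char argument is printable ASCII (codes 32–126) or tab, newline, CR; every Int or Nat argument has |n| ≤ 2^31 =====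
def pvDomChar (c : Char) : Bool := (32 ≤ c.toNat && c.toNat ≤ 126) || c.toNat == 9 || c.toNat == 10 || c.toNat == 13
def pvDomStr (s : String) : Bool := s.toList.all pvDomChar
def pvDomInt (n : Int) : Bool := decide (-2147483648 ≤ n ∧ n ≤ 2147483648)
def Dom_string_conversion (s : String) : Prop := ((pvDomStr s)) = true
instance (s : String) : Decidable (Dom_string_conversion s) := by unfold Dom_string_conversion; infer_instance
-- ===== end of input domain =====

-- B replaces split()-plus-nested-loop by one single character scan with an in_word flag and a letter buffer (same return value; same O(n) cost).

-- ===== PORT A =====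
-- literal port of A: split on whitespace, filter each word to ASCII letters, join with ' '
def string_conversion (s : String) : String :=
  let letter : PySem.Set Char :=
    PySem.Set.ofList "abcdefghijklmnopqrstuvwxyzABCDEFGHIJKLMNOPQRSTUVWXYZ".toList
  let words := PySem.Str.split₀ s
  let res : List String := words.foldl (fun res word =>
    let a : List Char := word.toList.foldl
      (fun a l => if PySem.Set.contains letter l then a ++ [l] else a) []
    res ++ [String.ofList a]) []
  PySem.Str.join " " res

-- ===== PORT B =====
-- literal port of B: one scan over the characters, state = (res, buf, in_word)
def string_conversion_alt (s : String) : String :=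
  let letters : PySem.Set Char :=
    PySem.Set.ofList "abcdefghijklmnopqrstuvwxyzABCDEFGHIJKLMNOPQRSTUVWXYZ".toList
  let st : List String × List Char × Bool := s.toList.foldl
    (fun st c =>
      let (res, buf, inWord) := st
      if PySem.Chars.isspace c then
        if inWord then (res ++ [String.ofList buf], [], false) else st
      else
        (res, (if PySem.Set.contains letters c then buf ++ [c] else buf), true))
    ([], [], false)
  let res := if st.2.2 then st.1 ++ [String.ofList st.2.1] else st.1
  PySem.Str.join " " res

-- ===== PRECONDITION & SPEC =====
def Spec_string_conversion (s : String) (out : String) : Prop := out = string_conversion_alt s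
instance (s : String) (out : String) : Decidable (Spec_string_conversion s out) := by unfold Spec_string_conversion; infer_instance

-- ===== CLAIM (what is proved, stated in full; the proofs are below) =====
def Claim_equal_string_conversion : Prop := ∀ (s : String), Dom_string_conversion s → Spec_string_conversion s (string_conversion s)

-- ===== LEMMAS AND PROOFS =====

-- the shared letter predicate
def pvLet (c : Char) : Bool :=
  PySem.Set.contains
    (PySem.Set.ofList "abcdefghijklmnopqrstuvwxyzABCDEFGHIJKLMNOPQRSTUVWXYZ".toList) c

-- B's step function, with the letter set fixed
def pvStep (st : List String × List Char × Bool) (c : Char) : List String × List Char × Bool :=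
  let (res, buf, inWord) := st
  if PySem.Chars.isspace c then
    if inWord then (res ++ [String.ofList buf], [], false) else st
  else
    (res, (if pvLet c then buf ++ [c] else buf), true)

def pvFin (st : List String × List Char × Bool) : List String :=
  if st.2.2 then st.1 ++ [String.ofList st.2.1] else st.1

def pvWordOut (w : List Char) : String := String.ofList (w.filter pvLet)

theorem pv_foldl_filter (l : List Char) (a0 : List Char) :
    l.foldl (fun a c => if pvLet c then a ++ [c] else a) a0 = a0 ++ l.filter pvLet := by
  induction l generalizing a0 with
  | nil => simp
  | cons c l ih =>
    simp only [List.foldl_cons, List.filter_cons]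
    by_cases h : pvLet c <;> simp [h, ih]

-- main invariant: B's scan started from the state corresponding to (cur, acc)
-- produces exactly the filtered words of split₀.go cs cur acc
theorem pv_scan_eq_go (cs : List Char) (cur : List Char) (acc : List (List Char)) :
    pvFin (cs.foldl pvStep
        (acc.reverse.map pvWordOut, cur.reverse.filter pvLet, !cur.isEmpty))
      = (PySem.Chars.split₀.go cs cur acc).map pvWordOut := by
  induction cs generalizing cur acc with
  | nil =>
    cases cur with
    | nil => simp [pvFin, PySem.Chars.split₀.go]
    | cons c cur => simp [pvFin, PySem.Chars.split₀.go, pvWordOut]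
  | cons c rest ih =>
    simp only [List.foldl_cons]
    by_cases hs : PySem.Chars.isspace c
    · cases cur with
      | nil =>
        have := ih [] acc
        simpa [pvStep, hs, PySem.Chars.split₀.go] using this
      | cons d cur' =>
        have h := ih [] ((d :: cur').reverse :: acc)
        rw [show PySem.Chars.split₀.go (c :: rest) (d :: cur') acc
            = PySem.Chars.split₀.go rest [] ((d :: cur').reverse :: acc) by
          simp [PySem.Chars.split₀.go, hs]]
        rw [← h]
        simp [pvStep, hs, pvWordOut]
    · have := ih (c :: cur) acc
      simp only [List.reverse_cons, List.filter_append, List.isEmpty_cons] at this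
      by_cases hl : pvLet c
      · simpa [pvStep, hs, hl, PySem.Chars.split₀.go] using this
      · simpa [pvStep, hs, hl, PySem.Chars.split₀.go] using this

-- ===== VERDICT (by name: the statement is the Claim_ definition above) =====
theorem string_conversion_spec : Claim_equal_string_conversion := by
  intro s _
  unfold Spec_string_conversion string_conversion string_conversion_alt
  have hA :
      (PySem.Str.split₀ s).foldl (fun res word =>
        res ++ [String.ofList (word.toList.foldl
          (fun a l => if pvLet l then a ++ [l] else a) [])]) []
      = (PySem.Chars.split₀ s.toList).map pvWordOut := by
    have : ∀ r0 (ws : List String),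
        ws.foldl (fun res word =>
          res ++ [String.ofList (word.toList.foldl
            (fun a l => if pvLet l then a ++ [l] else a) [])]) r0
        = r0 ++ ws.map (fun w => pvWordOut w.toList) := by
      intro r0 ws
      induction ws generalizing r0 with
      | nil => simp
      | cons w ws ih =>
        rw [List.foldl_cons, ih]
        simp [pv_foldl_filter, pvWordOut]
    rw [this]
    simp [PySem.Str.split₀]
  have hB :
      pvFin (s.toList.foldl pvStep ([], [], false))
      = (PySem.Chars.split₀ s.toList).map pvWordOut := by
    have := pv_scan_eq_go s.toList [] []
    simpa [PySem.Chars.split₀] using this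
  show PySem.Str.join " " _ = PySem.Str.join " " _
  rw [show (fun (a : List Char) (l : Char) =>
      if PySem.Set.contains (PySem.Set.ofList
        "abcdefghijklmnopqrstuvwxyzABCDEFGHIJKLMNOPQRSTUVWXYZ".toList) l
      then a ++ [l] else a) = (fun a l => if pvLet l then a ++ [l] else a) from rfl]
  rw [hA, ← hB]
  rfl
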